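-- pv_equiv track=rewrite | github.com/kuangsangudu/algorithm | atcoder/atcoder beginner contest 247/E2.py | f
-- ===== SOURCE A (Python) =====
-- def f(a):
--     ret, s = 0, 0
--     for x in a:
--         if x == 0:
--             ret += s * (s + 1) // 2
--             s = 0
--         else:
--             s += 1
--     ret += s * (s + 1) // 2
--     return ret
-- ===== SOURCE B (Python) =====
-- def f(a):
--     ret, s = 0, 0
--     for x in a:
--         if x == 0:
--             s = 0
--         else:
--             s += 1
--         ret += s
--     return ret
-- ===== Notes on version B (the rewrite author's own statement) =====
-- stated objective: simpler
-- what changed: B counts subarrays ending at each position (add the current run length every step), replacing A's triangular-number flush at each run boundary plus the final flush.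
import Mathlib
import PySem

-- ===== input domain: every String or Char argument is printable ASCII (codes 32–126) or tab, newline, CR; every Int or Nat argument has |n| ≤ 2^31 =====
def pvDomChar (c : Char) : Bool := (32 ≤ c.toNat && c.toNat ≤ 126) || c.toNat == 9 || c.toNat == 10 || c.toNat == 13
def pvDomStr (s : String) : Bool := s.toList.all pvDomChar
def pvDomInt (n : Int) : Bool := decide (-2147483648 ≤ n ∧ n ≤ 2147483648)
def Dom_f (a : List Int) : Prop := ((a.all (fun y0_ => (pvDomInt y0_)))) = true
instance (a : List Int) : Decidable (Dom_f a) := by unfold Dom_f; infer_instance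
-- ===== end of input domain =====

-- ===== PORT A =====
-- Header: B replaces A's per-run triangular flush with an incremental per-position count (objective: simpler).
def f (a : List Int) : Int :=
  let st := a.foldl (fun (p : Int × Int) x =>
    if x == 0 then (p.1 + PySem.Int.floordiv (p.2 * (p.2 + 1)) 2, 0)
    else (p.1, p.2 + 1)) (0, 0)
  st.1 + PySem.Int.floordiv (st.2 * (st.2 + 1)) 2

-- ===== PORT B =====
def f_alt (a : List Int) : Int :=
  let st := a.foldl (fun (p : Int × Int) x =>
    let s := if x == 0 then 0 else p.2 + 1
    (p.1 + s, s)) (0, 0)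
  st.1

-- ===== PRECONDITION & SPEC =====
def Spec_f (a : List Int) (out : Int) : Prop := out = f_alt a
instance (a : List Int) (out : Int) : Decidable (Spec_f a out) := by unfold Spec_f; infer_instance

-- ===== CLAIM (what is proved, stated in full; the proofs are below) =====
def Claim_equal_f : Prop := ∀ (a : List Int), Dom_f a → Spec_f a (f a)

-- ===== LEMMAS AND PROOFS =====

-- ===== VERDICT (by name: the statement is the Claim_ definition above) =====
-- Invariant: B's running total equals A's running total plus the pending triangular number.
theorem loop_inv (a : List Int) (ret s : Int) :
    (a.foldl (fun (p : Int × Int) x =>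
      let t := if x == 0 then 0 else p.2 + 1
      (p.1 + t, t)) (ret + PySem.Int.floordiv (s * (s + 1)) 2, s)).1 =
    (let st := a.foldl (fun (p : Int × Int) x =>
      if x == 0 then (p.1 + PySem.Int.floordiv (p.2 * (p.2 + 1)) 2, 0)
      else (p.1, p.2 + 1)) (ret, s)
    st.1 + PySem.Int.floordiv (st.2 * (st.2 + 1)) 2) := by
  induction a generalizing ret s with
  | nil => simp
  | cons x xs ih =>
    simp only [List.foldl_cons]
    by_cases hx : x = 0
    · simp only [hx, beq_self_eq_true, if_pos]
      have := ih (ret + PySem.Int.floordiv (s * (s + 1)) 2) 0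
      simpa using this
    · have hb : (x == 0) = false := by simp [hx]
      simp only [hb, Bool.false_eq_true, if_false]
      have h2 : ret + PySem.Int.floordiv (s * (s + 1)) 2 + (s + 1)
          = ret + PySem.Int.floordiv ((s + 1) * (s + 1 + 1)) 2 := by
        rw [PySem.Int.floordiv_eq_ediv_of_pos (by norm_num),
          PySem.Int.floordiv_eq_ediv_of_pos (by norm_num),
          show (s + 1) * (s + 1 + 1) = s * (s + 1) + (s + 1) * 2 by ring,
          Int.add_mul_ediv_right _ _ (by norm_num)]
        ring
      rw [h2]
      exact ih ret (s + 1)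

theorem f_spec : Claim_equal_f := by
  intro a _
  unfold Spec_f f f_alt
  have := loop_inv a 0 0
  simp only at this ⊢
  have h0 : PySem.Int.floordiv ((0:Int) * (0 + 1)) 2 = 0 := by decide
  rw [← this, h0, add_zero]
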